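-- pv_equiv track=rewrite | github.com/metebalci/srbms-data | scripts/fetch-icon.py | find_closest_icon_levels
-- ===== SOURCE A (Python) =====
-- ICON_LEVEL_ALTITUDES = {
--     80: 484,     # Surface (varies 5-4460m with terrain)
--     79: 514,
--     78: 553,
--     77: 596,
--     76: 645,
--     75: 698,
--     74: 754,
--     73: 815,
--     72: 879,
--     71: 946,
--     70: 1017,
--     69: 1091,
--     68: 1168,
--     67: 1248,
--     66: 1331,
--     65: 1418,
--     64: 1507,
--     63: 1600,
--     62: 1696,
--     61: 1795,
--     60: 1897,
--     59: 2002,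
--     58: 2111,
--     57: 2223,
--     56: 2338,
--     55: 2456,
--     54: 2579,
--     53: 2704,
--     52: 2833,
--     51: 2966,
--     50: 3103,
--     49: 3244,
--     48: 3388,
--     47: 3537,
--     46: 3689,
--     45: 3846,
--     44: 4007,
--     43: 4173,
--     42: 4343,
--     41: 4518,
--     40: 4698,
--     39: 4883,
--     38: 5073,
--     37: 5268,
--     36: 5469,
--     35: 5675,
--     34: 5887,
--     33: 6106,
--     32: 6330,
--     31: 6562,
--     30: 6800,
--     29: 7045,
--     28: 7297,
--     27: 7558,
--     26: 7826,
--     25: 8103,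
--     24: 8388,
--     23: 8683,
--     22: 8988,
--     21: 9304,
--     20: 9630,
--     19: 9969,
--     18: 10320,
--     17: 10684,
--     16: 11064,
--     15: 11459,
--     14: 11872,
--     13: 12304,
--     12: 12757,
--     11: 13234,
--     10: 13738,
--     9: 14273,
--     8: 14843,
--     7: 15456,
--     6: 16119,
--     5: 16851,
--     4: 17671,
--     3: 18624,
--     2: 19808,
--     1: 22000,
-- }
--
-- def find_closest_icon_levels(target_altitudes: list) -> dict:
--     """Find ICON model levels closest to our target altitudes."""
--     level_to_altitude = ICON_LEVEL_ALTITUDES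
--     altitude_to_level = {}
--
--     for target in target_altitudes:
--         closest_level = min(level_to_altitude.keys(),
--                           key=lambda l: abs(level_to_altitude[l] - target))
--         altitude_to_level[target] = closest_level
--
--     return altitude_to_level
-- ===== SOURCE B (Python) =====
-- # Levels 80..1 paired with strictly increasing altitudes; level = 80 - index.
-- _ALTS = [
--     484, 514, 553, 596, 645, 698, 754, 815, 879, 946,
--     1017, 1091, 1168, 1248, 1331, 1418, 1507, 1600, 1696, 1795,
--     1897, 2002, 2111, 2223, 2338, 2456, 2579, 2704, 2833, 2966,
--     3103, 3244, 3388, 3537, 3689, 3846, 4007, 4173, 4343, 4518,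
--     4698, 4883, 5073, 5268, 5469, 5675, 5887, 6106, 6330, 6562,
--     6800, 7045, 7297, 7558, 7826, 8103, 8388, 8683, 8988, 9304,
--     9630, 9969, 10320, 10684, 11064, 11459, 11872, 12304, 12757, 13234,
--     13738, 14273, 14843, 15456, 16119, 16851, 17671, 18624, 19808, 22000,
-- ]
--
-- # _THR[i] is the largest integer target for which altitude _ALTS[i] is still
-- # at least as close as _ALTS[i+1] (ties go to the lower altitude, as min does).
-- _THR = [(_ALTS[i] + _ALTS[i + 1]) // 2 for i in range(len(_ALTS) - 1)]
--
--
-- def find_closest_icon_levels(target_altitudes: list) -> dict: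
--     """Find ICON model levels closest to our target altitudes."""
--     altitude_to_level = {}
--     for target in target_altitudes:
--         lo = 0
--         hi = len(_THR)
--         while lo < hi:
--             mid = (lo + hi) // 2
--             if _THR[mid] < target:
--                 lo = mid + 1
--             else:
--                 hi = mid
--         altitude_to_level[target] = 80 - lo
--     return altitude_to_level
-- ===== Notes on version B (the rewrite author's own statement) =====
-- stated objective: faster
-- what changed: Replaces A's per-target linear min-scan over the 80-entry level table (a dict lookup per candidate) by a binary search over precomputed midpoint thresholds, with ties resolved to the lower altitude exactly as min's first-minimum rule does.
import Mathlib
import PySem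

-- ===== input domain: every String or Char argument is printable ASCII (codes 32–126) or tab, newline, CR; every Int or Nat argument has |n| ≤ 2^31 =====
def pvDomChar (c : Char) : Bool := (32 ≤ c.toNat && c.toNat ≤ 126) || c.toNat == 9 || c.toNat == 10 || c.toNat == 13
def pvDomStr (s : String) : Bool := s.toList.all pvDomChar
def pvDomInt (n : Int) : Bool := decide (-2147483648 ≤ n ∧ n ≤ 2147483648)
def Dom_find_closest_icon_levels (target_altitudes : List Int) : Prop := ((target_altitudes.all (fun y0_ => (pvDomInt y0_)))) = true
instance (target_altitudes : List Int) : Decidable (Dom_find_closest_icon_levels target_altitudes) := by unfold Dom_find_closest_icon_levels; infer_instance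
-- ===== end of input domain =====

-- B replaces A's per-target linear min-scan of the 80-entry table by a binary search over
-- precomputed midpoint thresholds (objective: faster by a constant mechanism — ~7 comparisons
-- per target instead of 80 dict lookups).

-- ===== PORT A =====
-- ICON_LEVEL_ALTITUDES, in insertion order (level 80 … 1, altitudes ascending).
def iconTable : PySem.Dict Int Int := PySem.Dict.ofList [(80, 484), (79, 514), (78, 553), (77, 596), (76, 645), (75, 698), (74, 754), (73, 815), (72, 879), (71, 946), (70, 1017), (69, 1091), (68, 1168), (67, 1248), (66, 1331), (65, 1418), (64, 1507), (63, 1600), (62, 1696), (61, 1795), (60, 1897), (59, 2002), (58, 2111), (57, 2223), (56, 2338), (55, 2456), (54, 2579), (53, 2704), (52, 2833), (51, 2966), (50, 3103), (49, 3244), (48, 3388), (47, 3537), (46, 3689), (45, 3846), (44, 4007), (43, 4173), (42, 4343), (41, 4518), (40, 4698), (39, 4883), (38, 5073), (37, 5268), (36, 5469), (35, 5675), (34, 5887), (33, 6106), (32, 6330), (31, 6562), (30, 6800), (29, 7045), (28, 7297), (27, 7558), (26, 7826), (25, 8103), (24, 8388), (23, 8683), (22, 8988), (21, 9304), (20, 9630),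 (19, 9969), (18, 10320), (17, 10684), (16, 11064), (15, 11459), (14, 11872), (13, 12304), (12, 12757), (11, 13234), (10, 13738), (9, 14273), (8, 14843), (7, 15456), (6, 16119), (5, 16851), (4, 17671), (3, 18624), (2, 19808), (1, 22000)]

-- 'min(level_to_altitude.keys(), key=lambda l: abs(level_to_altitude[l] - target))';
-- the lambda's dict lookup is ported as getD with default 0, exact here because every l
-- ranges over the dict's own keys; min over the nonempty keys list never raises, so .getD 0
-- of the Option is exact too.
def find_closest_icon_levels (target_altitudes : List Int) : List (Int × Int) :=
  (target_altitudes.foldl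
    (fun d target =>
      d.insert target
        ((PySem.List.min? iconTable.keys (fun l => |iconTable.getD l 0 - target|)).getD 0))
    PySem.Dict.empty).items

-- ===== PORT B =====
-- _ALTS: the table's altitudes, ascending; level = 80 - index.
def bAlts : List Int := [484, 514, 553, 596, 645, 698, 754, 815, 879, 946, 1017, 1091, 1168, 1248, 1331, 1418, 1507, 1600, 1696, 1795, 1897, 2002, 2111, 2223, 2338, 2456, 2579, 2704, 2833, 2966, 3103, 3244, 3388, 3537, 3689, 3846, 4007, 4173, 4343, 4518, 4698, 4883, 5073, 5268, 5469, 5675, 5887, 6106, 6330, 6562, 6800, 7045, 7297, 7558, 7826, 8103, 8388, 8683, 8988, 9304, 9630, 9969, 10320, 10684, 11064, 11459, 11872, 12304, 12757, 13234, 13738, 14273, 14843, 15456, 16119, 16851, 17671, 18624, 19808, 22000]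

-- _THR = [(_ALTS[i] + _ALTS[i+1]) // 2 for i in range(len(_ALTS) - 1)]
def bThr : List Int :=
  (PySem.List.pyRange 0 ((bAlts.length : Int) - 1) 1).map
    (fun i => PySem.Int.floordiv (PySem.List.pyGetD bAlts i 0 + PySem.List.pyGetD bAlts (i + 1) 0) 2)

-- the 'while lo < hi' binary-search loop of B ('mid' is written out at each occurrence)
def bsLoop (target lo hi : Int) : Int :=
  if _h : lo < hi then
    if PySem.List.pyGetD bThr (PySem.Int.floordiv (lo + hi) 2) 0 < target then
      bsLoop target (PySem.Int.floordiv (lo + hi) 2 + 1) hi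
    else
      bsLoop target lo (PySem.Int.floordiv (lo + hi) 2)
  else lo
termination_by (hi - lo).toNat
decreasing_by
  · have h1 := PySem.Int.floordiv_two_mid_bounds (le_of_lt _h) (lo := lo) (hi := hi)
    omega
  · have _h1 := PySem.Int.floordiv_two_mid_bounds (le_of_lt _h) (lo := lo) (hi := hi)
    have h2 : PySem.Int.floordiv (lo + hi) 2 < hi := by
      rw [PySem.Int.floordiv_lt_iff_lt_mul (by omega)]; omega
    omega

def find_closest_icon_levels_alt (target_altitudes : List Int) : List (Int × Int) :=
  (target_altitudes.foldl
    (fun d target => d.insert target (80 - bsLoop target 0 ((bThr.length : Int))))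
    PySem.Dict.empty).items

-- ===== PRECONDITION & SPEC =====
def Spec_find_closest_icon_levels (target_altitudes : List Int) (out : List (Int × Int)) : Prop := out = find_closest_icon_levels_alt target_altitudes
instance (target_altitudes : List Int) (out : List (Int × Int)) : Decidable (Spec_find_closest_icon_levels target_altitudes out) := by unfold Spec_find_closest_icon_levels; infer_instance

-- ===== CLAIM (what is proved, stated in full; the proofs are below) =====
def Claim_equal_find_closest_icon_levels : Prop := ∀ (target_altitudes : List Int), Dom_find_closest_icon_levels target_altitudes → Spec_find_closest_icon_levels target_altitudes (find_closest_icon_levels target_altitudes)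

-- ===== LEMMAS AND PROOFS =====

-- concrete table facts, all by evaluation
set_option maxRecDepth 100000 in
lemma bThr_len : bThr.length = 79 := by decide
set_option maxRecDepth 100000 in
lemma keys_len : iconTable.keys.length = 80 := by decide
set_option maxRecDepth 100000 in
lemma keys_at : ∀ j : Nat, j < 80 → iconTable.keys.getD j 0 = 80 - (j : Int) := by decide
set_option maxRecDepth 100000 in
lemma table_at : ∀ j : Nat, j < 80 → iconTable.getD (80 - (j : Int)) 0 = bAlts.getD j 0 := by decide
set_option maxRecDepth 100000 in
lemma alts_adj : ∀ j : Nat, j < 79 → bAlts.getD j 0 < bAlts.getD (j + 1) 0 := by decide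
set_option maxRecDepth 100000 in
lemma alts_mono : ∀ j : Nat, j < 80 → ∀ i : Nat, i < 80 → i ≤ j → bAlts.getD i 0 ≤ bAlts.getD j 0 := by decide
set_option maxRecDepth 100000 in
lemma thr_mid : ∀ j : Nat, j < 79 →
    2 * bThr.getD j 0 ≤ bAlts.getD j 0 + bAlts.getD (j + 1) 0 ∧
    bAlts.getD j 0 + bAlts.getD (j + 1) 0 < 2 * bThr.getD j 0 + 2 := by decide
set_option maxRecDepth 100000 in
lemma thr_mono : ∀ j : Nat, j < 79 → ∀ i : Nat, i < 79 → i ≤ j → bThr.getD i 0 ≤ bThr.getD j 0 := by decide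

-- the step function of Python's min (first minimal element under strict '<')
def mstep (key : Int → Int) : Option Int → Int → Option Int :=
  fun acc x =>
    match acc with
    | none => some x
    | some m => if key x < key m then some x else some m

lemma min?_eq_foldl (ls : List Int) (key : Int → Int) :
    PySem.List.min? ls key = ls.foldl (mstep key) none := by
  unfold PySem.List.min?
  congr 1
  funext acc x
  cases acc <;> rfl

lemma mstep_stop (key : Int → Int) (m : Int) :
    ∀ xs : List Int, (∀ x ∈ xs, key m ≤ key x) → xs.foldl (mstep key) (some m) = some m := by
  intro xs
  induction xs with
  | nil => intro _; rfl
  | cons y ys ih =>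
    intro h
    have hy : ¬ key y < key m := not_lt.mpr (h y (List.mem_cons_self))
    simpa [List.foldl, mstep, if_neg hy] using ih (fun x hx => h x (List.mem_cons_of_mem _ hx))

-- Python's min returns the FIRST minimum: if the key strictly decreases up to position r and
-- position r is a minimum of the rest, min? returns the element at r.
lemma min?_first (key : Int → Int) :
    ∀ (ls : List Int) (r : Nat), r < ls.length →
      (∀ j : Nat, j < r → key (ls.getD (j + 1) 0) < key (ls.getD j 0)) →
      (∀ j : Nat, r ≤ j → j < ls.length → key (ls.getD r 0) ≤ key (ls.getD j 0)) →
      PySem.List.min? ls key = some (ls.getD r 0) := by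
  intro ls
  induction ls with
  | nil => intro r hr; simp at hr
  | cons x xs ih =>
    intro r hr h1 h2
    rw [min?_eq_foldl]
    match r with
    | 0 =>
      have hstop : ∀ y ∈ xs, key x ≤ key y := by
        intro y hy
        obtain ⟨j, hj, hjy⟩ := List.getElem_of_mem hy
        have h3 := h2 (j + 1) (Nat.zero_le _) (by simpa using Nat.succ_lt_succ hj)
        rw [List.getD_cons_zero, List.getD_cons_succ, List.getD_eq_getElem xs 0 hj, hjy] at h3
        exact h3
      simpa [List.foldl, mstep] using mstep_stop key x xs hstop
    | r' + 1 =>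
      match xs, hr with
      | y :: ys, hr =>
        have hy : key y < key x := by simpa using h1 0 (Nat.zero_lt_succ _)
        have : ((y :: ys).foldl (mstep key) (some y)) = some ((y :: ys).getD r' 0) := by
          have := ih r' (by simpa using Nat.lt_of_succ_lt_succ hr)
            (fun j hj => by simpa using h1 (j + 1) (Nat.succ_lt_succ hj))
            (fun j hjr hjl => by
              simpa using h2 (j + 1) (Nat.succ_le_succ hjr) (by simpa using Nat.succ_lt_succ hjl))
          rw [min?_eq_foldl] at this
          simpa [List.foldl, mstep] using this
        calc ((x :: y :: ys).foldl (mstep key) none)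
            = (y :: ys).foldl (mstep key) (some x) := by simp [List.foldl, mstep]
          _ = ys.foldl (mstep key) (some y) := by simp [List.foldl, mstep, if_pos hy]
          _ = some ((x :: y :: ys).getD (r' + 1) 0) := by
              have h3 := this
              simp [List.foldl, mstep] at h3
              simpa using h3

-- binary-search invariant: bsLoop returns the first index whose threshold is ≥ target
lemma bsLoop_inv (t : Int) :
    ∀ n : Nat, ∀ lo hi : Int, (hi - lo).toNat = n → 0 ≤ lo → lo ≤ hi → hi ≤ 79 →
      (∀ j : Nat, (j : Int) < lo → bThr.getD j 0 < t) →
      (∀ j : Nat, hi ≤ (j : Int) → j < 79 → t ≤ bThr.getD j 0) →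
      lo ≤ bsLoop t lo hi ∧ bsLoop t lo hi ≤ hi ∧
      (∀ j : Nat, (j : Int) < bsLoop t lo hi → bThr.getD j 0 < t) ∧
      (∀ j : Nat, bsLoop t lo hi ≤ (j : Int) → j < 79 → t ≤ bThr.getD j 0) := by
  intro n
  induction n using Nat.strong_induction_on with
  | _ n ih =>
    intro lo hi hn h0 hlh hhi hlow hhigh
    rw [bsLoop]
    by_cases h : lo < hi
    · rw [dif_pos h]
      have hmb := PySem.Int.floordiv_two_mid_bounds (le_of_lt h) (lo := lo) (hi := hi)
      have hmlt : PySem.Int.floordiv (lo + hi) 2 < hi := by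
        rw [PySem.Int.floordiv_lt_iff_lt_mul (by omega)]; omega
      set m := PySem.Int.floordiv (lo + hi) 2 with hm
      have hmn : m = ((m.toNat : Int)) := by omega
      have hmlen : m.toNat < 79 := by omega
      have hlenI : ((bThr.length : Nat) : Int) = 79 := by norm_num [bThr_len]
      have hget : PySem.List.pyGetD bThr m 0 = bThr.getD m.toNat 0 := by
        rw [PySem.List.pyGetD_eq_getElem bThr 0 (by omega) (by omega)]
        exact (List.getD_eq_getElem bThr 0 (by omega : m.toNat < bThr.length)).symm
      by_cases hc : PySem.List.pyGetD bThr m 0 < t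
      · rw [if_pos hc]
        have hlow' : ∀ j : Nat, (j : Int) < m + 1 → bThr.getD j 0 < t := by
          intro j hj
          have hjm : j ≤ m.toNat := by omega
          have hjlt : j < 79 := by omega
          have hmono := thr_mono m.toNat hmlen j hjlt hjm
          have hmt : bThr.getD m.toNat 0 < t := by rw [← hget]; exact hc
          omega
        exact (ih (hi - (m + 1)).toNat (by omega) (m + 1) hi (by omega) (by omega) (by omega)
          hhi hlow' hhigh).imp (fun h' => by omega) (fun h' => h')
      · rw [if_neg hc]
        have hhigh' : ∀ j : Nat, m ≤ (j : Int) → j < 79 → t ≤ bThr.getD j 0 := by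
          intro j hjm hj79
          have hmono := thr_mono j hj79 m.toNat hmlen (by omega)
          have hmt : t ≤ bThr.getD m.toNat 0 := by rw [← hget]; omega
          omega
        exact (ih (m - lo).toNat (by omega) lo m (by omega) h0 (by omega) (by omega)
          hlow hhigh').imp (fun h' => h') (fun h' => h'.imp (fun h'' => by omega) (fun h'' => h''))
    · rw [dif_neg h]
      have hle : lo = hi := le_antisymm hlh (not_lt.mp h)
      exact ⟨le_refl _, by omega, hlow, by rw [hle]; exact hhigh⟩

-- per-target agreement: the first minimum of A's scan is the level at B's bisection index
lemma perTarget (t : Int) :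
    (PySem.List.min? iconTable.keys (fun l => |iconTable.getD l 0 - t|)).getD 0
      = 80 - bsLoop t 0 ((bThr.length : Int)) := by
  have hinv := bsLoop_inv t ((79 : Int) - 0).toNat 0 79 rfl (by omega) (by omega) (by omega)
    (by intro j hj; omega) (by intro j hj hj'; omega)
  obtain ⟨h0r, hr79, hlow, hhigh⟩ := hinv
  set r := bsLoop t 0 79 with hrdef
  have hrn : r = ((r.toNat : Int)) := by omega
  have hr80 : r.toNat < 80 := by omega
  have hkeyat : ∀ j : Nat, j < 80 →
      (fun l => |iconTable.getD l 0 - t|) (iconTable.keys.getD j 0) = |bAlts.getD j 0 - t| := by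
    intro j hj
    simp only [keys_at j hj, table_at j hj]
  have hmin := min?_first (fun l => |iconTable.getD l 0 - t|) iconTable.keys r.toNat
    (by rw [keys_len]; exact hr80)
    (by
      intro j hj
      have hj79 : j < 79 := by omega
      rw [hkeyat (j + 1) (by omega), hkeyat j (by omega)]
      have hadj := alts_adj j hj79
      have hthr := thr_mid j hj79
      have hlt : bThr.getD j 0 < t := hlow j (by omega)
      rcases abs_cases (bAlts.getD (j + 1) 0 - t) with ⟨e1, _⟩ | ⟨e1, _⟩ <;>
        rcases abs_cases (bAlts.getD j 0 - t) with ⟨e2, _⟩ | ⟨e2, _⟩ <;>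
          rw [e1, e2] <;> omega)
    (by
      intro j hjr hjl
      rw [keys_len] at hjl
      rw [hkeyat j hjl, hkeyat r.toNat hr80]
      rcases Nat.eq_or_lt_of_le hjr with heq | hlt
      · rw [heq]
      · have hr79' : r.toNat < 79 := by omega
        have hthr := thr_mid r.toNat hr79'
        have hge : t ≤ bThr.getD r.toNat 0 := hhigh r.toNat (by omega) hr79'
        have hm1 := alts_mono j hjl (r.toNat + 1) (by omega) (by omega)
        have hm2 := alts_mono j hjl r.toNat (by omega) (by omega)
        have hadj := alts_adj r.toNat hr79'
        rcases abs_cases (bAlts.getD r.toNat 0 - t) with ⟨e1, _⟩ | ⟨e1, _⟩ <;>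
          rcases abs_cases (bAlts.getD j 0 - t) with ⟨e2, _⟩ | ⟨e2, _⟩ <;>
            rw [e1, e2] <;> omega)
  have hlenI : ((bThr.length : Nat) : Int) = 79 := by norm_num [bThr_len]
  rw [hmin, keys_at r.toNat hr80, hlenI]
  simp only [Option.getD_some]
  omega

-- ===== VERDICT (by name: the statement is the Claim_ definition above) =====
set_option maxRecDepth 100000 in
theorem find_closest_icon_levels_spec : Claim_equal_find_closest_icon_levels := by
  intro ts _hdom
  unfold Spec_find_closest_icon_levels
  unfold find_closest_icon_levels find_closest_icon_levels_alt
  congr 1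
  apply PySem.List.foldl_congr_mem
  intro acc x _
  rw [perTarget x]
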